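-- pv_equiv track=rewrite | github.com/getsen/rag-prac | backend/app/chunk/chunk.py | _find_code_block_boundaries
-- ===== SOURCE A (Python) =====
-- from typing import List, Optional
--
-- def _find_code_block_boundaries(lines: List[str]) -> List[tuple[int, int]]:
--     """
--     Find start and end line indices of all code blocks.
--     Returns list of (start_idx, end_idx) tuples.
--     """
--     boundaries = []
--     in_fence = False
--     fence_start = None
--
--     for i, line in enumerate(lines):
--         if line.strip().startswith("```"):
--             if not in_fence:
--                 in_fence = True
--                 fence_start = i
--             else:
--                 in_fence = False
--                 if fence_start is not None:
--                     boundaries.append((fence_start, i))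
--                     fence_start = None
--
--     # If unclosed fence, close at end of lines
--     if in_fence and fence_start is not None:
--         boundaries.append((fence_start, len(lines) - 1))
--
--     return boundaries
-- ===== SOURCE B (Python) =====
-- def _find_code_block_boundaries(lines):
--     """Two-phase: collect all fence line indices, then pair them up consecutively;
--     a lone trailing fence is closed at len(lines) - 1."""
--     fence_indices = [i for i, line in enumerate(lines) if line.strip().startswith("```")]
--     boundaries = []
--     it = fence_indices
--     while len(it) >= 2:
--         boundaries.append((it[0], it[1]))
--         it = it[2:]
--     if it:
--         boundaries.append((it[0], len(lines) - 1))
--     return boundaries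
-- ===== Notes on version B (the rewrite author's own statement) =====
-- stated objective: simpler
-- what changed: Replaced the in_fence/fence_start boolean state machine by a two-phase decomposition: collect all fence line indices in one comprehension, then pair them up two at a time, closing a lone trailing fence at len(lines)-1.
import Mathlib
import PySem

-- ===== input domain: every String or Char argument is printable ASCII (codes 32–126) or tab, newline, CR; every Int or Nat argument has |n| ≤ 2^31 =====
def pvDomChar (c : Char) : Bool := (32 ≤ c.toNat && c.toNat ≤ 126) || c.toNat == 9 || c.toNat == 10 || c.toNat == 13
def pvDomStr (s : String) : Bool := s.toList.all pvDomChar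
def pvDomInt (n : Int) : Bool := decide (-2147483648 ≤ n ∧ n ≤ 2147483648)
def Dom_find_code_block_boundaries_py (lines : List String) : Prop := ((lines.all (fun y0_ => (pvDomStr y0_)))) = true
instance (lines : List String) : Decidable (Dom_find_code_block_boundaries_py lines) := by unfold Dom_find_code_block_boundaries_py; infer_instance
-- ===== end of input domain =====

-- B replaces A's in_fence/fence_start state machine by a two-phase decomposition
-- (collect fence indices, then pair consecutively); objective: simpler, same cost.


-- line.strip().startswith("```")  (shared by both Pythons verbatim)
def pvIsFence (line : String) : Bool :=
  PySem.Str.startswith (PySem.Str.strip line) "```"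

-- ===== PORT A =====
-- the for-loop of A, carrying (i, boundaries, in_fence, fence_start); the [] case is
-- the post-loop "if unclosed fence, close at len(lines)-1" step (n = len(lines))
def pvALoop (n : Int) : List String → Int → List (Int × Int) → Bool → Option Int → List (Int × Int)
  | [], _, bs, in_fence, fs =>
      if in_fence then
        match fs with
        | some s => bs ++ [(s, n - 1)]
        | none => bs
      else bs
  | l :: rest, i, bs, in_fence, fs =>
      if pvIsFence l then
        if !in_fence then
          pvALoop n rest (i + 1) bs true (some i)
        else
          match fs with
          | some s => pvALoop n rest (i + 1) (bs ++ [(s, i)]) false none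
          | none => pvALoop n rest (i + 1) bs false none
      else pvALoop n rest (i + 1) bs in_fence fs

def find_code_block_boundaries_py (lines : List String) : List (Int × Int) :=
  pvALoop (lines.length : Int) lines 0 [] false none

-- ===== PORT B =====
-- phase 1: [i for i, line in enumerate(lines) if line.strip().startswith("```")]
def pvFenceIndices : List String → Int → List Int
  | [], _ => []
  | l :: rest, i =>
      if pvIsFence l then i :: pvFenceIndices rest (i + 1) else pvFenceIndices rest (i + 1)

-- phase 2: the while-loop pairing two at a time; a lone leftover closes at n - 1
def pvPairUp (n : Int) : List Int → List (Int × Int)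
  | a :: b :: rest => (a, b) :: pvPairUp n rest
  | [a] => [(a, n - 1)]
  | [] => []

def find_code_block_boundaries_py_alt (lines : List String) : List (Int × Int) :=
  pvPairUp (lines.length : Int) (pvFenceIndices lines 0)

-- ===== PRECONDITION & SPEC =====
def Spec_find_code_block_boundaries_py (lines : List String) (out : List (Int × Int)) : Prop := out = find_code_block_boundaries_py_alt lines
instance (lines : List String) (out : List (Int × Int)) : Decidable (Spec_find_code_block_boundaries_py lines out) := by unfold Spec_find_code_block_boundaries_py; infer_instance

-- ===== CLAIM (what is proved, stated in full; the proofs are below) =====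
def Claim_equal_find_code_block_boundaries_py : Prop := ∀ (lines : List String), Dom_find_code_block_boundaries_py lines → Spec_find_code_block_boundaries_py lines (find_code_block_boundaries_py lines)

-- ===== LEMMAS AND PROOFS =====

-- the state machine, from a closed state (resp. an open state with start s), produces
-- exactly the consecutive pairing of the remaining fence indices (prefixed by s when open)
theorem pvALoop_eq (n : Int) (ls : List String) : ∀ (i : Int) (bs : List (Int × Int)),
    pvALoop n ls i bs false none = bs ++ pvPairUp n (pvFenceIndices ls i) ∧
    ∀ s : Int, pvALoop n ls i bs true (some s) = bs ++ pvPairUp n (s :: pvFenceIndices ls i) := by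
  induction ls with
  | nil => intro i bs; simp [pvALoop, pvFenceIndices, pvPairUp]
  | cons l rest ih =>
      intro i bs
      by_cases h : pvIsFence l = true
      · constructor
        · simp only [pvALoop, pvFenceIndices, h, if_pos, Bool.not_false]
          exact (ih (i + 1) bs).2 i
        · intro s
          simp only [pvALoop, pvFenceIndices, h, if_pos, Bool.not_true, pvPairUp]
          rw [(ih (i + 1) (bs ++ [(s, i)])).1, List.append_assoc]
          rfl
      · constructor
        · simp only [pvALoop, pvFenceIndices, h, if_neg, Bool.false_eq_true, not_false_iff]
          exact (ih (i + 1) bs).1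
        · intro s
          simp only [pvALoop, pvFenceIndices, h, if_neg, Bool.false_eq_true, not_false_iff]
          exact (ih (i + 1) bs).2 s

-- ===== VERDICT (by name: the statement is the Claim_ definition above) =====
theorem find_code_block_boundaries_py_spec : Claim_equal_find_code_block_boundaries_py := by
  intro lines _
  show find_code_block_boundaries_py lines = find_code_block_boundaries_py_alt lines
  unfold find_code_block_boundaries_py find_code_block_boundaries_py_alt
  rw [(pvALoop_eq (lines.length : Int) lines 0 []).1]
  rfl
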